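-- pv_equiv track=rewrite | github.com/2Hasan2/Every-Day-problem | ICPC/003/yet_another_card_deck.py | process_deck
-- ===== SOURCE A (Python) =====
-- def process_deck(n, q, a, queries):
--     color_positions = {}
--     for i in range(n):
--         if a[i] not in color_positions:
--             color_positions[a[i]] = i + 1
--
--     result = []
--     for color in queries:
--         pos = color_positions[color]
--         result.append(pos)
--
--         for key in color_positions:
--             if color_positions[key] < pos:
--                 color_positions[key] += 1
--         color_positions[color] = 1
--
--     return result
-- ===== SOURCE B (Python) =====
-- def process_deck(n, q, a, queries):
--     # Slot-timeline algorithm: each index of a gets a token on a slot line; a query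
--     # jumps the color's token to a fresh smaller slot and reports the count of
--     # occupied slots up to its own -- positions are never stored or updated.
--     first = {}
--     for i in range(n):
--         if a[i] not in first:
--             first[a[i]] = i
--     m = len(queries)
--     occ = [0] * (m + n + 1)   # occ[s] == 1 iff some token occupies slot s
--     slot = [0] * n            # slot[i] = current slot of index i's token
--     for i in range(n):
--         slot[i] = m + i + 1
--         occ[m + i + 1] = 1
--     top = m
--     result = []
--     for c in queries:
--         s = slot[first[c]]
--         result.append(sum(occ[:s + 1]))
--         occ[s] = 0
--         occ[top] = 1
--         slot[first[c]] = top
--         top -= 1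
--     return result
-- ===== Notes on version B (the rewrite author's own statement) =====
-- stated objective: alternative
-- what changed: A stores a position per color and rewrites the whole dictionary on every query; B stores no positions at all: each index gets a token on a slot timeline, a query jumps the color's token to a fresh smaller slot in O(1) and its position is recomputed on demand as the count of occupied slots up to its own.
import Mathlib
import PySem

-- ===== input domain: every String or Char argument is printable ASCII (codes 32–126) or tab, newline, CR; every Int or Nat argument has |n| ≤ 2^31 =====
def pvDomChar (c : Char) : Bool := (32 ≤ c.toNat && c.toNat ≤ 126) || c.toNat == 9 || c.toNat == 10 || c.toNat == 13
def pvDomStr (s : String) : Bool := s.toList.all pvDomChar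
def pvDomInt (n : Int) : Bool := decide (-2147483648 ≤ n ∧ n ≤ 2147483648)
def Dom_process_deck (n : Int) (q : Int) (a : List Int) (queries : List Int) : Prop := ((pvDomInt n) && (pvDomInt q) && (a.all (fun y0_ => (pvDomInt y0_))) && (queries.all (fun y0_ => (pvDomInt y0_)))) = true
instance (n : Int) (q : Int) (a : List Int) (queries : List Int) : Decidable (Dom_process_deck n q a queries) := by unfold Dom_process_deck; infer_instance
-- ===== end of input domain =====

-- B replaces A's per-query rewrite of a color->position dictionary by a slot
-- timeline: every index of a holds a token on a slot; a query moves the color's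
-- token to a fresh smaller slot in O(1) and its position is recomputed on demand
-- as the count of occupied slots up to its own (objective: alternative).

-- ===== PORT A =====
-- A's first loop: build {color -> first position i+1} over range(n)
def pvBuildA (n : Int) (a : List Int) : PySem.Dict Int Int :=
  (PySem.List.pyRange 0 n 1).foldl
    (fun d i =>
      let ai := PySem.List.pyGetD a i 0
      if d.contains ai then d else d.insert ai (i + 1))
    PySem.Dict.empty

-- body of A's query loop: emit pos, shift every smaller position up, set color to 1
def pvStepA (st : PySem.Dict Int Int × List Int) (color : Int) : PySem.Dict Int Int × List Int :=
  let pos := st.1.getD color 0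
  let res := st.2 ++ [pos]
  let d1 := st.1.keys.foldl
    (fun d' key => if d'.getD key 0 < pos then d'.modify key 0 (· + 1) else d') st.1
  (d1.insert color 1, res)

def process_deck (n : Int) (q : Int) (a : List Int) (queries : List Int) : List Int :=
  (queries.foldl pvStepA (pvBuildA n a, [])).2

-- ===== PORT B =====
-- B's first loop: build {color -> first index i} over range(n)
def pvBuildF (n : Int) (a : List Int) : PySem.Dict Int Int :=
  (PySem.List.pyRange 0 n 1).foldl
    (fun d i =>
      let ai := PySem.List.pyGetD a i 0
      if d.contains ai then d else d.insert ai i)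
    PySem.Dict.empty

-- B's second loop: place token i on slot m+i+1 (slot[i]=m+i+1; occ[m+i+1]=1).
-- Python's 'xs[i] = v' is ported as PySem.List.pySetD (exact here: every index
-- written on an input admitted by Pre_ is nonnegative and in range).
def pvInitB (n m : Int) : List Int × List Int :=
  (PySem.List.pyRange 0 n 1).foldl
    (fun (st : List Int × List Int) i =>
      (PySem.List.pySetD st.1 (m + i + 1) 1, PySem.List.pySetD st.2 i (m + i + 1)))
    (List.replicate (m + n + 1).toNat 0, List.replicate n.toNat 0)

-- body of B's query loop over state (occ, slot, top, result)
def pvStepB (f : PySem.Dict Int Int) (st : List Int × List Int × Int × List Int) (c : Int) :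
    List Int × List Int × Int × List Int :=
  let s := PySem.List.pyGetD st.2.1 (f.getD c 0) 0
  let res := st.2.2.2 ++ [(PySem.List.slice st.1 none (some (s + 1))).sum]
  let occ := PySem.List.pySetD (PySem.List.pySetD st.1 s 0) st.2.2.1 1
  let slot := PySem.List.pySetD st.2.1 (f.getD c 0) st.2.2.1
  (occ, slot, st.2.2.1 - 1, res)

def process_deck_alt (n : Int) (q : Int) (a : List Int) (queries : List Int) : List Int :=
  let f := pvBuildF n a
  let m : Int := (queries.length : Int)
  let ini := pvInitB n m
  (queries.foldl (pvStepB f) (ini.1, ini.2, m, [])).2.2.2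

-- ===== PRECONDITION & SPEC =====
-- Pre_ excludes exactly the inputs on which A raises: n > len(a) (IndexError in
-- the build loop) and a query color absent from a[:n] (KeyError).
def Pre_process_deck (n : Int) (q : Int) (a : List Int) (queries : List Int) : Prop :=
  n ≤ (a.length : Int) ∧ ∀ c ∈ queries, c ∈ a.take n.toNat
instance (n : Int) (q : Int) (a : List Int) (queries : List Int) : Decidable (Pre_process_deck n q a queries) := by unfold Pre_process_deck; infer_instance

def pvWitness_process_deck : Int × Int × List Int × List Int := (3, 2, [5, 5, 3], [3, 5])

def Spec_process_deck (n : Int) (q : Int) (a : List Int) (queries : List Int) (out : List Int) : Prop := out = process_deck_alt n q a queries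
instance (n : Int) (q : Int) (a : List Int) (queries : List Int) (out : List Int) : Decidable (Spec_process_deck n q a queries out) := by unfold Spec_process_deck; infer_instance

-- ===== CLAIM (what is proved, stated in full; the proofs are below) =====
def Claim_equal_process_deck : Prop := ∀ (n : Int) (q : Int) (a : List Int) (queries : List Int), Dom_process_deck n q a queries → Pre_process_deck n q a queries → Spec_process_deck n q a queries (process_deck n q a queries)

-- ===== LEMMAS AND PROOFS =====

-- number of occupied slots ≤ s, read off the token list
def pvCnt (slot : List Int) (s : Int) : Int :=
  ((slot.filter (fun x => decide (x ≤ s))).length : Int)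

-- the invariant tying A's dictionary to B's (occ, slot, top) state
def pvInv (N : Nat) (M : Int) (f d : PySem.Dict Int Int) (occ slot : List Int) (top : Int) : Prop :=
  occ.length = (M + N + 1).toNat ∧
  slot.length = N ∧
  0 ≤ top ∧ top ≤ M ∧
  (∀ x ∈ slot, top < x ∧ x ≤ M + N) ∧
  slot.Nodup ∧
  (∀ k : Nat, k < occ.length → occ.getD k 0 = if (k : Int) ∈ slot then 1 else 0) ∧
  d.keys = f.keys ∧ d.keys.Nodup ∧
  (∀ c ∈ f.keys, 0 ≤ f.getD c 0 ∧ f.getD c 0 < (N : Int)) ∧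
  (∀ c ∈ f.keys, d.getD c 0 = pvCnt slot (slot.getD (f.getD c 0).toNat 0)) ∧
  (∀ c₁ ∈ f.keys, ∀ c₂ ∈ f.keys, f.getD c₁ 0 = f.getD c₂ 0 → c₁ = c₂)

-- getD after a point update
lemma pvGetDSet (xs : List Int) (j : Nat) (v : Int) (k : Nat) :
    (xs.set j v).getD k 0 = if k = j ∧ j < xs.length then v else xs.getD k 0 := by
  rw [List.getD_eq_getElem?_getD, List.getElem?_set, List.getD_eq_getElem?_getD]
  by_cases hjk : j = k
  · subst hjk
    by_cases hlen : j < xs.length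
    · simp [hlen]
    · simp [hlen, List.getElem?_eq_none (by omega : xs.length ≤ j)]
  · rw [if_neg hjk, if_neg (fun h => hjk h.1.symm)]

lemma pvTakeSum (occ : List Int) : ∀ t : Nat, t ≤ occ.length →
    (occ.take t).sum = ∑ k ∈ Finset.range t, occ.getD k 0 := by
  intro t
  induction t with
  | zero => intro _; simp
  | succ t ih =>
    intro h
    have ht : t < occ.length := by omega
    rw [List.take_add_one, List.getElem?_eq_getElem ht]
    simp only [Option.toList_some, List.sum_append, List.sum_cons, List.sum_nil]
    rw [ih (by omega), Finset.sum_range_succ, List.getD_eq_getElem occ 0 ht]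
    ring

lemma pvIndSum : ∀ (L : List Int), L.Nodup → ∀ t : Nat,
    (∑ k ∈ Finset.range t, (if ((k : Nat) : Int) ∈ L then (1 : Int) else 0)) =
      ((L.filter (fun x => decide (0 ≤ x ∧ x < (t : Int)))).length : Int) := by
  intro L
  induction L with
  | nil => intro _ t; simp
  | cons x L ih =>
    intro hnd t
    rw [List.nodup_cons] at hnd
    obtain ⟨hx, hnd⟩ := hnd
    have hsplit : ∀ k : Nat, (if ((k : Nat) : Int) ∈ x :: L then (1 : Int) else 0) =
        (if ((k : Nat) : Int) = x then (1 : Int) else 0) +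
        (if ((k : Nat) : Int) ∈ L then (1 : Int) else 0) := by
      intro k
      by_cases h1 : ((k : Nat) : Int) = x
      · rw [if_pos (List.mem_cons.mpr (Or.inl h1)), if_pos h1, if_neg (h1 ▸ hx)]; norm_num
      · by_cases h2 : ((k : Nat) : Int) ∈ L
        · rw [if_pos (List.mem_cons.mpr (Or.inr h2)), if_neg h1, if_pos h2]; norm_num
        · rw [if_neg (by simp [List.mem_cons, h1, h2]), if_neg h1, if_neg h2]; norm_num
    rw [Finset.sum_congr rfl (fun k _ => hsplit k), Finset.sum_add_distrib, ih hnd t]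
    have hone : (∑ k ∈ Finset.range t, (if ((k : Nat) : Int) = x then (1 : Int) else 0)) =
        if 0 ≤ x ∧ x < (t : Int) then 1 else 0 := by
      by_cases hx0 : 0 ≤ x ∧ x < (t : Int)
      · have hcg : ∀ k ∈ Finset.range t,
            (if ((k : Nat) : Int) = x then (1 : Int) else 0) = if k = x.toNat then 1 else 0 := by
          intro k _
          by_cases h : k = x.toNat
          · rw [if_pos h, if_pos (by omega)]
          · rw [if_neg h, if_neg (by omega)]
        rw [Finset.sum_congr rfl hcg,
          Finset.sum_ite_eq' (Finset.range t) x.toNat (fun _ => (1 : Int)),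
          if_pos (Finset.mem_range.mpr (by omega)), if_pos hx0]
      · rw [if_neg hx0, Finset.sum_eq_zero]
        intro k hk
        rw [if_neg (by have := Finset.mem_range.mp hk; omega)]
    rw [hone, List.filter_cons]
    by_cases hx0 : 0 ≤ x ∧ x < (t : Int)
    · rw [if_pos hx0, if_pos (by simpa using hx0)]
      simp only [List.length_cons]
      push_cast
      ring
    · rw [if_neg hx0, if_neg (by simpa using hx0)]
      ring

lemma pvSumTake (occ : List Int) (slot : List Int) (hnd : slot.Nodup)
    (hocc : ∀ k : Nat, k < occ.length → occ.getD k 0 = if (k : Int) ∈ slot then 1 else 0) :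
    ∀ t : Nat, t ≤ occ.length →
      (occ.take t).sum = ((slot.filter (fun x => decide (0 ≤ x ∧ x < (t : Int)))).length : Int) := by
  intro t ht
  rw [pvTakeSum occ t ht,
    Finset.sum_congr rfl (fun k hk => hocc k (by exact lt_of_lt_of_le (Finset.mem_range.mp hk) ht)),
    pvIndSum slot hnd t]

-- strict monotonicity of the occupied-slot count at occupied slots
lemma pvCntLt (L : List Int) (u v : Int) (hv : v ∈ L) (huv : u < v) :
    pvCnt L u < pvCnt L v := by
  unfold pvCnt
  have h2 := List.countP_eq_countP_filter_add L (fun x => decide (x ≤ v)) (fun x => decide (x ≤ u))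
  have h3 : (L.filter (fun x => decide (x ≤ u))).countP (fun x => decide (x ≤ v)) =
      (L.filter (fun x => decide (x ≤ u))).length := by
    rw [List.countP_eq_length]
    intro x hx
    have := List.of_mem_filter hx
    simp at this ⊢
    omega
  have h4 : 0 < (L.filter (fun x => !decide (x ≤ u))).countP (fun x => decide (x ≤ v)) := by
    rw [List.countP_pos_iff]
    exact ⟨v, List.mem_filter.mpr ⟨hv, by simp; omega⟩, by simp⟩
  have h5 : L.countP (fun x => decide (x ≤ u)) = (L.filter (fun x => decide (x ≤ u))).length :=
    List.countP_eq_length_filter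
  have h6 : L.countP (fun x => decide (x ≤ v)) = (L.filter (fun x => decide (x ≤ v))).length :=
    List.countP_eq_length_filter
  omega

lemma pvFoldModify (pos : Int) : ∀ (ks : List Int) (d : PySem.Dict Int Int), ks.Nodup →
    (∀ k ∈ ks, k ∈ d.keys) →
    (ks.foldl (fun d' key => if d'.getD key 0 < pos then d'.modify key 0 (· + 1) else d') d).keys = d.keys ∧
    ∀ k, (ks.foldl (fun d' key => if d'.getD key 0 < pos then d'.modify key 0 (· + 1) else d') d).getD k 0 =
      if k ∈ ks ∧ d.getD k 0 < pos then d.getD k 0 + 1 else d.getD k 0 := by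
  intro ks
  induction ks with
  | nil => intro d _ _; simp
  | cons key ks ih =>
    intro d hnd hmem
    rw [List.nodup_cons] at hnd
    obtain ⟨hk, hnd⟩ := hnd
    simp only [List.foldl_cons]
    set d1 := if d.getD key 0 < pos then d.modify key 0 (· + 1) else d with hd1
    have hkeys1 : d1.keys = d.keys := by
      rw [hd1]; split
      · rw [PySem.Dict.keys_modify, PySem.Dict.keys_insert_of_contains]
        exact (PySem.Dict.contains_iff_mem_keys d key).mpr (hmem key (by simp))
      · rfl
    obtain ⟨ihkeys, ihget⟩ := ih d1 hnd (fun k hk' => by rw [hkeys1]; exact hmem k (by simp [hk']))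
    refine ⟨by rw [ihkeys, hkeys1], ?_⟩
    intro x
    rw [ihget x]
    by_cases hx : x = key
    · subst hx
      have h1 : d1.getD x 0 = if d.getD x 0 < pos then d.getD x 0 + 1 else d.getD x 0 := by
        rw [hd1]; split <;> simp [PySem.Dict.getD_modify_self, *]
      have hxks : x ∉ ks := hk
      simp only [hxks, false_and, if_false, List.mem_cons, true_or, true_and, h1]
    · have h1 : d1.getD x 0 = d.getD x 0 := by
        rw [hd1]; split
        · exact PySem.Dict.getD_modify_of_ne _ _ _ hx
        · rfl
      simp [h1, List.mem_cons, hx]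

lemma pvRangeNorm (n : Int) : PySem.List.pyRange 0 n 1 = PySem.List.pyRange 0 ((n.toNat : Nat) : Int) 1 := by
  by_cases h : 0 ≤ n
  · rw [Int.toNat_of_nonneg h]
  · rw [PySem.List.pyRange_one_eq_nil (by omega), PySem.List.pyRange_one_eq_nil (by omega)]

-- the step lemma: one query preserves the invariant and emits equal outputs
lemma pvStep (N : Nat) (M : Int) (f d : PySem.Dict Int Int) (occ slot : List Int) (top : Int)
    (res : List Int) (c : Int) (hinv : pvInv N M f d occ slot top) (htop : 1 ≤ top)
    (hc : c ∈ f.keys) :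
    (pvStepA (d, res) c).2 = (pvStepB f (occ, slot, top, res) c).2.2.2 ∧
    pvInv N M f (pvStepA (d, res) c).1 (pvStepB f (occ, slot, top, res) c).1
      (pvStepB f (occ, slot, top, res) c).2.1 (top - 1) := by
  obtain ⟨hocclen, hslotlen, htop0, htopM, hbnd, hnd, hocc, hkeys, hknd, hfb, hval, hinj⟩ := hinv
  obtain ⟨hfc0, hfcN⟩ := hfb c hc
  have hM0 : 0 ≤ M := le_trans htop0 htopM
  set i : Nat := (f.getD c 0).toNat with hidef
  have hic : ((i : Nat) : Int) = f.getD c 0 := by omega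
  have hilen : i < slot.length := by omega
  have hs : PySem.List.pyGetD slot (f.getD c 0) 0 = slot[i] := by
    rw [PySem.List.pyGetD_eq_getElem slot 0 hfc0 (by omega : f.getD c 0 < (slot.length : Int))]
  set s : Int := slot[i] with hsdef
  have hsmem : s ∈ slot := List.getElem_mem _
  obtain ⟨hstop, hsMN⟩ := hbnd s hsmem
  -- decomposition of slot around index i
  set T := slot.take i with hTdef
  set D := slot.drop (i + 1) with hDdef
  have hsplit : slot = T ++ s :: D := by
    rw [hTdef, hDdef, hsdef, ← List.drop_eq_getElem_cons hilen, List.take_append_drop]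
  have hTlen : T.length = i := by rw [hTdef, List.length_take]; omega
  have hndm : (s :: (T ++ D)).Nodup := List.nodup_middle.mp (hsplit ▸ hnd)
  rw [List.nodup_cons] at hndm
  obtain ⟨hsTD, hndTD⟩ := hndm
  have hTsub : ∀ x ∈ T, x ∈ slot := fun x hx => hsplit ▸ List.mem_append.mpr (Or.inl hx)
  have hDsub : ∀ x ∈ D, x ∈ slot :=
    fun x hx => hsplit ▸ List.mem_append.mpr (Or.inr (List.mem_cons_of_mem _ hx))
  have htopTD : top ∉ T ++ D := by
    intro hmem
    rcases List.mem_append.mp hmem with h | h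
    · exact absurd (hbnd top (hTsub top h)).1 (lt_irrefl top)
    · exact absurd (hbnd top (hDsub top h)).1 (lt_irrefl top)
  -- B's new components
  have hB1 : (pvStepB f (occ, slot, top, res) c).1 = (occ.set s.toNat 0).set top.toNat 1 := by
    simp only [pvStepB, hs, ← hsdef]
    rw [PySem.List.pySetD_of_nonneg _ _ (by omega : (0:Int) ≤ s),
      PySem.List.pySetD_of_nonneg _ _ htop0]
  have hB2 : (pvStepB f (occ, slot, top, res) c).2.1 = T ++ top :: D := by
    simp only [pvStepB]
    rw [PySem.List.pySetD_of_nonneg _ _ hfc0, ← hidef, List.set_eq_take_cons_drop top hilen,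
      ← hTdef, ← hDdef]
  -- counting decomposition over T ++ x :: D
  have hdecomp : ∀ (x y : Int), pvCnt (T ++ x :: D) y =
      ((T.filter (fun z => decide (z ≤ y))).length : Int) + (if x ≤ y then 1 else 0) +
      ((D.filter (fun z => decide (z ≤ y))).length : Int) := by
    intro x y
    unfold pvCnt
    rw [List.filter_append, List.filter_cons]
    by_cases hxy : x ≤ y
    · rw [if_pos (by simpa using hxy), if_pos hxy]
      simp only [List.length_append, List.length_cons]
      push_cast; ring
    · rw [if_neg (by simpa using hxy), if_neg hxy]
      simp only [List.length_append]
      push_cast; ring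
  -- the emitted value
  have hvalc : d.getD c 0 = pvCnt slot s := by
    rw [hval c hc, ← hidef, List.getD_eq_getElem slot 0 hilen]
  have hsum : (PySem.List.slice occ none (some (s + 1))).sum = pvCnt slot s := by
    rw [PySem.List.slice_to occ (by omega : (0:Int) ≤ s + 1)]
    have ht1 : (s + 1).toNat ≤ occ.length := by omega
    rw [pvSumTake occ slot hnd hocc (s + 1).toNat ht1]
    unfold pvCnt
    have hfil : slot.filter (fun x => decide (0 ≤ x ∧ x < (((s + 1).toNat : Nat) : Int))) =
        slot.filter (fun x => decide (x ≤ s)) := by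
      apply List.filter_congr
      intro x hx
      have h1 := (hbnd x hx).1
      simp only [decide_eq_decide]
      omega
    rw [hfil]
  have hout : (pvStepA (d, res) c).2 = (pvStepB f (occ, slot, top, res) c).2.2.2 := by
    simp only [pvStepA, pvStepB, hs, ← hsdef, hsum, hvalc]
  -- A's new dictionary
  have hcd : c ∈ d.keys := hkeys ▸ hc
  obtain ⟨hfk, hfg⟩ := pvFoldModify (d.getD c 0) d.keys d hknd (fun x hx => hx)
  set d1 := d.keys.foldl
    (fun d' key => if d'.getD key 0 < d.getD c 0 then d'.modify key 0 (· + 1) else d') d with hd1def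
  have hA1 : (pvStepA (d, res) c).1 = d1.insert c 1 := rfl
  have hd2keys : (d1.insert c 1).keys = d.keys := by
    rw [PySem.Dict.keys_insert_of_contains, hfk]
    rw [PySem.Dict.contains_iff_mem_keys, hfk]
    exact hcd
  have hd2get : ∀ x, (d1.insert c 1).getD x 0 = if x = c then 1 else
      (if x ∈ d.keys ∧ d.getD x 0 < d.getD c 0 then d.getD x 0 + 1 else d.getD x 0) := by
    intro x
    by_cases hx : x = c
    · subst hx; rw [PySem.Dict.getD_insert_self, if_pos rfl]
    · rw [PySem.Dict.getD_insert_of_ne _ _ _ hx, if_neg hx, hfg x]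
  refine ⟨hout, ?_⟩
  rw [hA1, hB1, hB2]
  have hlen1 : ((occ.set s.toNat 0).set top.toNat 1).length = (M + N + 1).toNat := by
    simp [List.length_set, hocclen]
  have hlen2 : (T ++ top :: D).length = N := by
    have := hsplit ▸ hslotlen
    simpa using this
  have hstopNat : s.toNat < occ.length := by omega
  have htopNat : top.toNat < occ.length := by omega
  refine ⟨hlen1, hlen2, by omega, by omega, ?_, ?_, ?_, ?_, ?_, hfb, ?_, hinj⟩
  · -- bounds
    intro x hx
    rcases List.mem_append.mp hx with h | h
    · have := hbnd x (hTsub x h); omega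
    · rcases List.mem_cons.mp h with h | h
      · omega
      · have := hbnd x (hDsub x h); omega
  · -- Nodup
    rw [List.nodup_middle, List.nodup_cons]
    exact ⟨htopTD, hndTD⟩
  · -- occupancy indicator
    intro k hk
    rw [hlen1] at hk
    rw [pvGetDSet, pvGetDSet]
    by_cases hkt : k = top.toNat
    · rw [if_pos ⟨hkt, by simp [List.length_set]; omega⟩]
      have : (k : Int) = top := by omega
      rw [if_pos (by rw [this]; exact List.mem_append.mpr (Or.inr List.mem_cons_self))]
    · rw [if_neg (by intro h; exact hkt h.1)]
      by_cases hks : k = s.toNat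
      · rw [if_pos ⟨hks, by omega⟩]
        have hksi : (k : Int) = s := by omega
        rw [if_neg ?_]
        rw [hksi]
        intro hmem
        rcases List.mem_append.mp hmem with h | h
        · exact hsTD (List.mem_append.mpr (Or.inl h))
        · rcases List.mem_cons.mp h with h | h
          · omega
          · exact hsTD (List.mem_append.mpr (Or.inr h))
      · rw [if_neg (by intro h; exact hks h.1)]
        rw [hocc k (by omega)]
        have hnes : (k : Int) ≠ s := by omega
        have hnet : (k : Int) ≠ top := by omega
        by_cases hk' : (k : Int) ∈ slot
        · have : (k : Int) ∈ T ++ top :: D := by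
            rcases List.mem_append.mp (hsplit ▸ hk') with h | h
            · exact List.mem_append.mpr (Or.inl h)
            · rcases List.mem_cons.mp h with h | h
              · exact absurd h hnes
              · exact List.mem_append.mpr (Or.inr (List.mem_cons_of_mem _ h))
          rw [if_pos this, if_pos hk']
        · have : (k : Int) ∉ T ++ top :: D := by
            intro hmem
            apply hk'
            rcases List.mem_append.mp hmem with h | h
            · exact hsplit ▸ List.mem_append.mpr (Or.inl h)
            · rcases List.mem_cons.mp h with h | h
              · exact absurd h hnet
              · exact hsplit ▸ List.mem_append.mpr (Or.inr (List.mem_cons_of_mem _ h))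
          rw [if_neg this, if_neg hk']
  · -- keys
    rw [hd2keys]; exact hkeys
  · -- keys nodup
    rw [hd2keys]; exact hknd
  · -- values
    intro c' hc'
    rw [hd2get c']
    by_cases hcc : c' = c
    · subst hcc
      rw [if_pos rfl]
      have hgtop : (T ++ top :: D).getD i 0 = top := by
        rw [List.getD_append_right _ _ _ _ (by omega), hTlen]
        simp
      rw [hgtop, hdecomp]
      have hTnil : T.filter (fun z => decide (z ≤ top)) = [] := by
        rw [List.filter_eq_nil_iff]
        intro z hz
        have := (hbnd z (hTsub z hz)).1
        simp; omega
      have hDnil : D.filter (fun z => decide (z ≤ top)) = [] := by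
        rw [List.filter_eq_nil_iff]
        intro z hz
        have := (hbnd z (hDsub z hz)).1
        simp; omega
      rw [hTnil, hDnil, if_pos (le_refl top)]
      simp
    · rw [if_neg hcc]
      obtain ⟨hfc0', hfcN'⟩ := hfb c' hc'
      set i' : Nat := (f.getD c' 0).toNat with hi'def
      have hii' : i' ≠ i := by
        intro h
        exact hcc (hinj c' hc' c hc (by omega))
      have hi'len : i' < slot.length := by omega
      set sk : Int := slot[i'] with hskdef
      have hskget : slot.getD i' 0 = sk := List.getD_eq_getElem slot 0 hi'len
      have hskmem : sk ∈ slot := List.getElem_mem _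
      obtain ⟨hsktop, hskMN⟩ := hbnd sk hskmem
      have hskns : sk ≠ s := by
        rw [hskdef, hsdef, ne_eq, hnd.getElem_inj_iff]
        exact hii'
      have hval' : d.getD c' 0 = pvCnt slot sk := by rw [hval c' hc', ← hi'def, hskget]
      have hget' : (T ++ top :: D).getD i' 0 = sk := by
        rcases Nat.lt_or_ge i' i with hlt | hge
        · rw [List.getD_append _ _ _ _ (by omega)]
          rw [← hskget, hsplit, List.getD_append _ _ _ _ (by omega)]
        · have hgt : i < i' := by omega
          rw [List.getD_append_right _ _ _ _ (by omega), hTlen]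
          have h1 : i' - i = (i' - i - 1) + 1 := by omega
          rw [h1, List.getD_cons_succ]
          rw [← hskget, hsplit, List.getD_append_right _ _ _ _ (by omega), hTlen, h1,
            List.getD_cons_succ]
          all_goals simp only [Nat.add_sub_cancel]
      rw [hget']
      have hcnt_old : pvCnt slot sk =
          ((T.filter (fun z => decide (z ≤ sk))).length : Int) + (if s ≤ sk then 1 else 0) +
          ((D.filter (fun z => decide (z ≤ sk))).length : Int) := by
        rw [hsplit] at *
        exact hdecomp s sk
      have hcnt_new : pvCnt (T ++ top :: D) sk =
          ((T.filter (fun z => decide (z ≤ sk))).length : Int) + 1 +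
          ((D.filter (fun z => decide (z ≤ sk))).length : Int) := by
        rw [hdecomp, if_pos (le_of_lt hsktop)]
      have hcd' : c' ∈ d.keys := hkeys ▸ hc'
      rcases lt_or_gt_of_ne hskns with hlt | hgt
      · -- sk < s : the key is shifted up
        have hstrict : pvCnt slot sk < pvCnt slot s := pvCntLt slot sk s hsmem hlt
        rw [if_pos ⟨hcd', by rw [hval', hvalc]; exact hstrict⟩]
        rw [hval', hcnt_new, hcnt_old, if_neg (by omega)]
        ring
      · -- s < sk : the key is unchanged
        have hstrict : pvCnt slot s < pvCnt slot sk := pvCntLt slot s sk hskmem hgt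
        rw [if_neg (by
          intro h
          rw [hval', hvalc] at h
          omega)]
        rw [hval', hcnt_new, hcnt_old, if_pos (le_of_lt hgt)]

-- the query fold
lemma pvFold (f : PySem.Dict Int Int) : ∀ (qs : List Int) (N : Nat) (M : Int)
    (d : PySem.Dict Int Int) (occ slot : List Int) (top : Int) (res : List Int),
    pvInv N M f d occ slot top → (qs.length : Int) ≤ top → (∀ c ∈ qs, c ∈ f.keys) →
    (qs.foldl pvStepA (d, res)).2 = (qs.foldl (pvStepB f) (occ, slot, top, res)).2.2.2 := by
  intro qs
  induction qs with
  | nil => intro N M d occ slot top res _ _ _; rfl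
  | cons c qs ih =>
    intro N M d occ slot top res hinv hlen hq
    simp only [List.length_cons] at hlen
    push_cast at hlen
    obtain ⟨hout, hinv'⟩ := pvStep N M f d occ slot top res c hinv
      (by omega) (hq c List.mem_cons_self)
    simp only [List.foldl_cons]
    have h1 := ih N M (pvStepA (d, res) c).1 (pvStepB f (occ, slot, top, res) c).1
      (pvStepB f (occ, slot, top, res) c).2.1 (top - 1) (pvStepB f (occ, slot, top, res) c).2.2.2
      hinv' (by omega) (fun x hx => hq x (List.mem_cons_of_mem _ hx))
    rw [show pvStepA (d, res) c =
        ((pvStepA (d, res) c).1, (pvStepB f (occ, slot, top, res) c).2.2.2) from by rw [← hout]]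
    exact h1

-- joint characterisation of the two first loops (dictionaries)
lemma pvBuildDicts (a : List Int) : ∀ (t : Nat), t ≤ a.length →
    (pvBuildA (t : Int) a).keys = (pvBuildF (t : Int) a).keys ∧
    (pvBuildA (t : Int) a).keys.Nodup ∧
    (∀ c ∈ (pvBuildF (t : Int) a).keys,
      0 ≤ (pvBuildF (t : Int) a).getD c 0 ∧ (pvBuildF (t : Int) a).getD c 0 < (t : Int) ∧
      PySem.List.pyGetD a ((pvBuildF (t : Int) a).getD c 0) 0 = c ∧
      (pvBuildA (t : Int) a).getD c 0 = (pvBuildF (t : Int) a).getD c 0 + 1) ∧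
    (∀ x, x ∈ (pvBuildF (t : Int) a).keys ↔ x ∈ a.take t) := by
  intro t
  induction t with
  | zero =>
    intro _
    have h0 : PySem.List.pyRange 0 ((0 : Nat) : Int) 1 = [] :=
      PySem.List.pyRange_one_eq_nil (by norm_num)
    have hA : pvBuildA ((0 : Nat) : Int) a = PySem.Dict.empty := by unfold pvBuildA; rw [h0]; rfl
    have hF : pvBuildF ((0 : Nat) : Int) a = PySem.Dict.empty := by unfold pvBuildF; rw [h0]; rfl
    rw [hA, hF]
    refine ⟨rfl, ?_, ?_, ?_⟩ <;> simp [PySem.Dict.empty, PySem.Dict.keys]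
  | succ t ih =>
    intro h1
    have hta : t < a.length := by omega
    obtain ⟨hkeq, hknd, hvals, hmem⟩ := ih (by omega)
    have hrange : PySem.List.pyRange 0 ((t + 1 : Nat) : Int) 1 =
        PySem.List.pyRange 0 (t : Int) 1 ++ [(t : Int)] := by
      have hc : ((t + 1 : Nat) : Int) = (t : Int) + 1 := by push_cast; ring
      rw [hc, PySem.List.pyRange_one_succ_right (by positivity)]
    have ham : PySem.List.pyGetD a ((t : Nat) : Int) 0 = a[t] := by
      rw [PySem.List.pyGetD_natCast, List.getD_eq_getElem a 0 hta]
    have hA : pvBuildA ((t + 1 : Nat) : Int) a =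
        (if (pvBuildA (t : Int) a).contains a[t] then pvBuildA (t : Int) a
         else (pvBuildA (t : Int) a).insert a[t] ((t : Int) + 1)) := by
      show (PySem.List.pyRange 0 ((t + 1 : Nat) : Int) 1).foldl _ _ = _
      rw [hrange, List.foldl_append]
      simp only [List.foldl_cons, List.foldl_nil]
      rw [show (PySem.List.pyRange 0 (t : Int) 1).foldl _ PySem.Dict.empty = pvBuildA (t : Int) a from rfl]
      simp only [ham]
    have hF : pvBuildF ((t + 1 : Nat) : Int) a =
        (if (pvBuildF (t : Int) a).contains a[t] then pvBuildF (t : Int) a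
         else (pvBuildF (t : Int) a).insert a[t] (t : Int)) := by
      show (PySem.List.pyRange 0 ((t + 1 : Nat) : Int) 1).foldl _ _ = _
      rw [hrange, List.foldl_append]
      simp only [List.foldl_cons, List.foldl_nil]
      rw [show (PySem.List.pyRange 0 (t : Int) 1).foldl _ PySem.Dict.empty = pvBuildF (t : Int) a from rfl]
      simp only [ham]
    have hcont : (pvBuildA (t : Int) a).contains a[t] = (pvBuildF (t : Int) a).contains a[t] := by
      rw [PySem.Dict.contains_eq_decide_mem_keys, PySem.Dict.contains_eq_decide_mem_keys, hkeq]
    have htake : a.take (t + 1) = a.take t ++ [a[t]] := by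
      rw [List.take_add_one, List.getElem?_eq_getElem hta]; rfl
    by_cases hcF : (pvBuildF (t : Int) a).contains a[t] = true
    · rw [hA, hF, hcont, if_pos hcF, if_pos hcF]
      have hatk : a[t] ∈ (pvBuildF (t : Int) a).keys := (PySem.Dict.contains_iff_mem_keys _ _).mp hcF
      refine ⟨hkeq, hknd, ?_, ?_⟩
      · intro c hc
        obtain ⟨h1', h2', h3', h4'⟩ := hvals c hc
        exact ⟨h1', by push_cast at h2' ⊢; omega, h3', h4'⟩
      · intro x
        rw [htake, List.mem_append, ← hmem x]
        constructor
        · intro h; exact Or.inl h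
        · rintro (h | h)
          · exact h
          · simp only [List.mem_singleton] at h; subst h; exact hatk
    · have hcA : ¬ (pvBuildA (t : Int) a).contains a[t] = true := by rw [hcont]; exact hcF
      rw [hA, hF, if_neg hcA, if_neg hcF]
      have hnotmem : a[t] ∉ (pvBuildF (t : Int) a).keys := by
        intro h; exact hcF ((PySem.Dict.contains_iff_mem_keys _ _).mpr h)
      have hnotmemA : a[t] ∉ (pvBuildA (t : Int) a).keys := by rw [hkeq]; exact hnotmem
      have hkeysA : ((pvBuildA (t : Int) a).insert a[t] ((t : Int) + 1)).keys =
          (pvBuildA (t : Int) a).keys ++ [a[t]] := by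
        simp only [PySem.Dict.keys,
          PySem.Dict.items_insert_of_not_contains _ _ (Bool.eq_false_iff.mpr hcA), List.map_append]
        rfl
      have hkeysF : ((pvBuildF (t : Int) a).insert a[t] (t : Int)).keys =
          (pvBuildF (t : Int) a).keys ++ [a[t]] := by
        simp only [PySem.Dict.keys,
          PySem.Dict.items_insert_of_not_contains _ _ (Bool.eq_false_iff.mpr hcF), List.map_append]
        rfl
      refine ⟨?_, ?_, ?_, ?_⟩
      · rw [hkeysA, hkeysF, hkeq]
      · rw [hkeysA]
        refine List.Nodup.append hknd (List.nodup_singleton _) ?_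
        intro x hx hx2
        simp only [List.mem_singleton] at hx2
        subst hx2
        exact hnotmemA hx
      · intro c hc
        rw [hkeysF] at hc
        rcases List.mem_append.mp hc with hcold | hcnewm
        · have hne : c ≠ a[t] := fun h => hnotmem (h ▸ hcold)
          obtain ⟨h1', h2', h3', h4'⟩ := hvals c hcold
          rw [PySem.Dict.getD_insert_of_ne _ _ _ hne, PySem.Dict.getD_insert_of_ne _ _ _ hne]
          exact ⟨h1', by push_cast at h2' ⊢; omega, h3', h4'⟩
        · simp only [List.mem_singleton] at hcnewm
          subst hcnewm
          rw [PySem.Dict.getD_insert_self, PySem.Dict.getD_insert_self]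
          refine ⟨by positivity, by push_cast; omega, ham, rfl⟩
      · intro x
        rw [hkeysF, htake]
        simp only [List.mem_append]
        rw [← hmem x]

-- the init fold after t of the n iterations (proof-only reformulation of pvInitB)
def pvInitFold (M : Int) (N : Nat) (t : Nat) : List Int × List Int :=
  (PySem.List.pyRange 0 (t : Int) 1).foldl
    (fun (st : List Int × List Int) i =>
      (PySem.List.pySetD st.1 (M + i + 1) 1, PySem.List.pySetD st.2 i (M + i + 1)))
    (List.replicate (M + N + 1).toNat 0, List.replicate N 0)

lemma pvInitFold_eq (M : Int) (N : Nat) : pvInitB (N : Int) M = pvInitFold M N N := by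
  unfold pvInitB pvInitFold
  norm_num

lemma pvInitAux (M : Int) (hM : 0 ≤ M) (N : Nat) : ∀ t : Nat, t ≤ N →
    (pvInitFold M N t).1.length = (M + N + 1).toNat ∧
    (pvInitFold M N t).2.length = N ∧
    (∀ j : Nat, j < N → (pvInitFold M N t).2.getD j 0 = if j < t then M + j + 1 else 0) ∧
    (∀ k : Nat, k < (M + N + 1).toNat →
      (pvInitFold M N t).1.getD k 0 = if M + 1 ≤ (k : Int) ∧ (k : Int) ≤ M + t then 1 else 0) := by
  intro t
  induction t with
  | zero =>
    intro _
    have h0 : PySem.List.pyRange 0 ((0 : Nat) : Int) 1 = [] :=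
      PySem.List.pyRange_one_eq_nil (by norm_num)
    unfold pvInitFold
    rw [h0]
    simp only [List.foldl_nil]
    refine ⟨by simp, by simp, ?_, ?_⟩
    · intro j hj
      rw [if_neg (by omega)]
      simp [List.getD_eq_getElem?_getD, List.getElem?_replicate, hj]
    · intro k hk
      rw [if_neg (by omega)]
      simp [List.getD_eq_getElem?_getD, List.getElem?_replicate, hk]
  | succ t ih =>
    intro h1
    have ht : t < N := by omega
    obtain ⟨hl1, hl2, hslot, hocc⟩ := ih (by omega)
    have hrange : PySem.List.pyRange 0 ((t + 1 : Nat) : Int) 1 =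
        PySem.List.pyRange 0 (t : Int) 1 ++ [(t : Int)] := by
      have hc : ((t + 1 : Nat) : Int) = (t : Int) + 1 := by push_cast; ring
      rw [hc, PySem.List.pyRange_one_succ_right (by positivity)]
    have hstep : pvInitFold M N (t + 1) =
        (PySem.List.pySetD (pvInitFold M N t).1 (M + (t : Int) + 1) 1,
         PySem.List.pySetD (pvInitFold M N t).2 (t : Int) (M + (t : Int) + 1)) := by
      unfold pvInitFold
      rw [hrange, List.foldl_append]
      simp only [List.foldl_cons, List.foldl_nil]
    rw [hstep,
      PySem.List.pySetD_of_nonneg _ _ (by omega : (0:Int) ≤ M + (t : Int) + 1),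
      PySem.List.pySetD_of_nonneg _ _ (by omega : (0:Int) ≤ ((t : Nat) : Int))]
    refine ⟨by simp [List.length_set, hl1], by simp [List.length_set, hl2], ?_, ?_⟩
    · intro j hj
      rw [pvGetDSet]
      by_cases hjt : j = t
      · subst hjt
        rw [if_pos ⟨by omega, by omega⟩, if_pos (by omega)]
      · rw [if_neg (by intro h; exact hjt (by omega)), hslot j hj]
        by_cases hjlt : j < t
        · rw [if_pos hjlt, if_pos (by omega)]
        · rw [if_neg hjlt, if_neg (by omega)]
    · intro k hk
      rw [pvGetDSet]
      by_cases hkt : k = (M + (t : Int) + 1).toNat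
      · rw [if_pos ⟨hkt, by omega⟩, if_pos (by omega)]
      · rw [if_neg (by intro h; exact hkt h.1), hocc k hk]
        by_cases hcond : M + 1 ≤ (k : Int) ∧ (k : Int) ≤ M + t
        · rw [if_pos hcond, if_pos (by omega)]
        · rw [if_neg hcond, if_neg (by omega)]

lemma pvCountRange (j : Nat) : ∀ N : Nat, j < N →
    (List.range N).countP (fun j' => decide (j' ≤ j)) = j + 1 := by
  intro N
  induction N with
  | zero => intro h; omega
  | succ N ih =>
    intro h
    rw [List.range_succ, List.countP_append]
    by_cases hN : j < N
    · rw [ih hN]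
      have hnle : ¬ N ≤ j := by omega
      simp [List.countP_cons, hnle]
    · have hjN : j = N := by omega
      subst hjN
      have hall : (List.range j).countP (fun j' => decide (j' ≤ j)) = j := by
        rw [List.countP_eq_length.mpr ?_, List.length_range]
        intro x hx
        have := List.mem_range.mp hx
        simp
        omega
      rw [hall]
      simp [List.countP_cons]

-- closed form of B's init loop
lemma pvInitChar (N : Nat) (M : Int) (hM : 0 ≤ M) :
    (pvInitB (N : Int) M).1.length = (M + N + 1).toNat ∧
    (pvInitB (N : Int) M).2 = (List.range N).map (fun (j : Nat) => M + (j : Int) + 1) ∧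
    (∀ k : Nat, k < (M + N + 1).toNat →
      (pvInitB (N : Int) M).1.getD k 0 = if M + 1 ≤ (k : Int) ∧ (k : Int) ≤ M + N then 1 else 0) := by
  obtain ⟨hl1, hl2, hslot, hocc⟩ := pvInitAux M hM N N (le_refl N)
  rw [pvInitFold_eq M N]
  refine ⟨hl1, ?_, hocc⟩
  apply List.ext_getElem
  · simp [hl2]
  · intro j h1 h2
    have hj : j < N := by simpa using h2
    have hval := hslot j hj
    rw [List.getD_eq_getElem _ 0 h1] at hval
    rw [hval, if_pos hj, List.getElem_map, List.getElem_range]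

-- the invariant holds after the two init loops
lemma pvInit (n : Int) (a : List Int) (queries : List Int) (hn : 0 ≤ n)
    (hna : n ≤ (a.length : Int)) :
    pvInv n.toNat (queries.length : Int) (pvBuildF n a) (pvBuildA n a)
      (pvInitB n (queries.length : Int)).1 (pvInitB n (queries.length : Int)).2
      (queries.length : Int) := by
  have hM : (0:Int) ≤ (queries.length : Int) := by positivity
  have hnN : n = ((n.toNat : Nat) : Int) := by omega
  rw [hnN]
  simp only [Int.toNat_natCast]
  set N := n.toNat with hNdef
  set M := (queries.length : Int) with hMdef
  have hNlen : N ≤ a.length := by omega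
  obtain ⟨hkeq, hknd, hvals, hmem⟩ := pvBuildDicts a N hNlen
  obtain ⟨hol, hslotEq, hoccChar⟩ := pvInitChar N M hM
  have hmemslot : ∀ k : Int, (k ∈ (pvInitB (N : Int) M).2) ↔ (M + 1 ≤ k ∧ k ≤ M + N) := by
    intro k
    rw [hslotEq]
    constructor
    · intro hx
      obtain ⟨j, hj, hje⟩ := List.mem_map.mp hx
      have := List.mem_range.mp hj
      omega
    · intro hx
      exact List.mem_map.mpr ⟨(k - (M + 1)).toNat, List.mem_range.mpr (by omega), by omega⟩
  refine ⟨hol, ?_, hM, le_refl M, ?_, ?_, ?_, hkeq, hknd, ?_, ?_, ?_⟩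
  · rw [hslotEq]; simp
  · intro x hx
    have := (hmemslot x).mp hx
    omega
  · rw [hslotEq]
    refine List.Nodup.map ?_ List.nodup_range
    intro j1 j2 hje
    have hje' : M + (j1 : Int) + 1 = M + (j2 : Int) + 1 := hje
    omega
  · intro k hk
    rw [hol] at hk
    rw [hoccChar k hk]
    by_cases hcond : M + 1 ≤ (k : Int) ∧ (k : Int) ≤ M + N
    · rw [if_pos hcond, if_pos ((hmemslot (k : Int)).mpr hcond)]
    · rw [if_neg hcond, if_neg (fun h => hcond ((hmemslot (k : Int)).mp h))]
  · intro c hc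
    exact ⟨(hvals c hc).1, (hvals c hc).2.1⟩
  · intro c hc
    obtain ⟨h0', h1', h2', h3'⟩ := hvals c hc
    set j : Nat := ((pvBuildF (N : Int) a).getD c 0).toNat with hjdef
    have hjN : j < N := by omega
    have hslotj : (pvInitB (N : Int) M).2.getD j 0 = M + j + 1 := by
      rw [hslotEq, List.getD_eq_getElem _ 0 (by simpa using hjN), List.getElem_map,
        List.getElem_range]
    rw [hslotj, h3']
    unfold pvCnt
    rw [hslotEq, ← List.countP_eq_length_filter, List.countP_map]
    have hcongr : (List.range N).countP
        ((fun x => decide (x ≤ M + (j : Int) + 1)) ∘ (fun j' : Nat => M + (j' : Int) + 1)) =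
        (List.range N).countP (fun j' : Nat => decide (j' ≤ j)) := by
      apply List.countP_congr
      intro x hx
      show decide (M + (x : Int) + 1 ≤ M + (j : Int) + 1) = true ↔ decide (x ≤ j) = true
      simp only [decide_eq_true_eq]
      omega
    rw [hcongr, pvCountRange j N hjN]
    omega
  · intro c1 hc1 c2 hc2 hfe
    have e1 := (hvals c1 hc1).2.2.1
    have e2 := (hvals c2 hc2).2.2.1
    rw [← e1, ← e2, hfe]

lemma pvMain (n : Int) (q : Int) (a : List Int) (queries : List Int)
    (hn : n ≤ (a.length : Int)) (hq : ∀ c ∈ queries, c ∈ a.take n.toNat) :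
    process_deck n q a queries = process_deck_alt n q a queries := by
  rcases queries with _ | ⟨c0, qs⟩
  · rfl
  · have hc0 : c0 ∈ a.take n.toNat := hq c0 List.mem_cons_self
    have hne : a.take n.toNat ≠ [] := by intro h; rw [h] at hc0; exact absurd hc0 (List.not_mem_nil)
    have hn0 : 0 ≤ n := by
      by_contra h
      exact hne (by simp [Int.toNat_of_nonpos (by omega : n ≤ 0)])
    have hinv := pvInit n a (c0 :: qs) hn0 hn
    have hkeys := (pvBuildDicts a n.toNat (by omega)).2.2.2
    have hFnorm : pvBuildF ((n.toNat : Nat) : Int) a = pvBuildF n a := by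
      unfold pvBuildF; rw [pvRangeNorm n]
    have hq' : ∀ c ∈ (c0 :: qs), c ∈ (pvBuildF n a).keys := by
      intro c hc
      rw [← hFnorm]
      exact (hkeys c).mpr (hq c hc)
    exact pvFold (pvBuildF n a) (c0 :: qs) n.toNat ((c0 :: qs).length : Int)
      (pvBuildA n a) _ _ _ [] hinv (by omega) hq'

-- ===== VERDICT (by name: the statement is the Claim_ definition above) =====
theorem process_deck_spec : Claim_equal_process_deck := by
  intro n q a queries _ hpre
  unfold Spec_process_deck
  exact pvMain n q a queries hpre.1 hpre.2
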